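-- pv_equiv track=rewrite | github.com/dinhgia2106/VietnameseAnccentRestore | vietnamese_accent_restore.py | _extract_corresponding_subsequence
-- ===== SOURCE A (Python) =====
-- from typing import Dict, List, Set, Tuple, Optional
--
-- def _extract_corresponding_subsequence(input_words: List[str],
--                                      ngram_words: List[str],
--                                      ngram_value: str) -> Optional[str]:
--     """Extract the part of ngram_value corresponding to input_words."""
--     input_len = len(input_words)
--     ngram_len = len(ngram_words)
--     ngram_value_words = ngram_value.split()
--
--     if len(ngram_value_words) != ngram_len:
--         return None
--
--     # Find position of input_words in ngram_words
--     for i in range(ngram_len - input_len + 1):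
--         if ngram_words[i:i+input_len] == input_words:
--             extracted_words = ngram_value_words[i:i+input_len]
--             return ' '.join(extracted_words)
--
--     return None
-- ===== SOURCE B (Python) =====
-- from typing import List, Optional
--
-- def _extract_corresponding_subsequence(input_words: List[str],
--                                        ngram_words: List[str],
--                                        ngram_value: str) -> Optional[str]:
--     """Walk the suffixes of the zipped (word, value) pairs; at the first
--     suffix whose words start with input_words, return the matching values."""
--     vals = ngram_value.split()
--     if len(vals) != len(ngram_words):
--         return None
--     m = len(input_words)
--     pairs = list(zip(ngram_words, vals))
--     while True:
--         if len(pairs) < m: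
--             return None
--         head = pairs[:m]
--         if [w for w, _ in head] == input_words:
--             return ' '.join(v for _, v in head)
--         pairs = pairs[1:]
-- ===== Notes on version B (the rewrite author's own statement) =====
-- stated objective: alternative
-- what changed: Replaces the index-range loop with repeated list slicing by one zip of (word, value) pairs followed by a recursion over the suffixes of that single list, testing the prefix of each suffix.
import Mathlib
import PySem

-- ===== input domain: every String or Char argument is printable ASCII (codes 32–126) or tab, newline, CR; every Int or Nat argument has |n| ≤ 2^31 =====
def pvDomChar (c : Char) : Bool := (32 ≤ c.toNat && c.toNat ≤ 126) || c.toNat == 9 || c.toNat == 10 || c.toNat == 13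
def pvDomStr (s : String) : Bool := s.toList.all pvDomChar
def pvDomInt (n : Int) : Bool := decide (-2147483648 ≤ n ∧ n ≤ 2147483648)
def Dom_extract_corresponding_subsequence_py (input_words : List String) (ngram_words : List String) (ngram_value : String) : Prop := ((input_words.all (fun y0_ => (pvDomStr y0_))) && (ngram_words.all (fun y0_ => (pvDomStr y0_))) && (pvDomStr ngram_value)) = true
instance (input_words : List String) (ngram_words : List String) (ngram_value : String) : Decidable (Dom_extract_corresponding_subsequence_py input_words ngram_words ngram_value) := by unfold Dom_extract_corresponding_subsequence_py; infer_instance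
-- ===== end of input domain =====

-- B replaces A's index-range loop over slices by one zip of (word, value) pairs and a recursion over its suffixes (objective: alternative decomposition; same result).

-- ===== PORT A =====
-- for i in range(ngram_len - input_len + 1): if ngram_words[i:i+input_len] == input_words: return ' '.join(ngram_value_words[i:i+input_len])
def pvALoop (input_words ngram_words vals : List String) : List Int → Option String
  | [] => none
  | i :: rest =>
    if PySem.List.slice ngram_words (some i) (some (i + (input_words.length : Int))) = input_words then
      some (PySem.Str.join " " (PySem.List.slice vals (some i) (some (i + (input_words.length : Int)))))
    else pvALoop input_words ngram_words vals rest

def extract_corresponding_subsequence_py (input_words : List String) (ngram_words : List String) (ngram_value : String) : Option String :=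
  let input_len : Int := input_words.length
  let ngram_len : Int := ngram_words.length
  let ngram_value_words := PySem.Str.split₀ ngram_value
  if (ngram_value_words.length : Int) ≠ ngram_len then none
  else pvALoop input_words ngram_words ngram_value_words (PySem.List.pyRange 0 (ngram_len - input_len + 1) 1)

-- ===== PORT B =====
-- while True: if len(pairs) < m: return None; head = pairs[:m]; if words of head == input_words: return ' '.join(values of head); pairs = pairs[1:]
def pvBLoop (input_words : List String) (pairs : List (String × String)) : Option String :=
  if pairs.length < input_words.length then none
  else if (pairs.take input_words.length).map Prod.fst = input_words then
    some (PySem.Str.join " " ((pairs.take input_words.length).map Prod.snd))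
  else
    match pairs with
    | [] => none
    | _ :: t => pvBLoop input_words t

def extract_corresponding_subsequence_py_alt (input_words : List String) (ngram_words : List String) (ngram_value : String) : Option String :=
  let vals := PySem.Str.split₀ ngram_value
  if (vals.length : Int) ≠ (ngram_words.length : Int) then none
  else pvBLoop input_words (ngram_words.zip vals)

-- ===== PRECONDITION & SPEC =====
def Spec_extract_corresponding_subsequence_py (input_words : List String) (ngram_words : List String) (ngram_value : String) (out : Option String) : Prop := out = extract_corresponding_subsequence_py_alt input_words ngram_words ngram_value
instance (input_words : List String) (ngram_words : List String) (ngram_value : String) (out : Option String) : Decidable (Spec_extract_corresponding_subsequence_py input_words ngram_words ngram_value out) := by unfold Spec_extract_corresponding_subsequence_py; infer_instance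

-- ===== CLAIM (what is proved, stated in full; the proofs are below) =====
def Claim_equal_extract_corresponding_subsequence_py : Prop := ∀ (input_words : List String) (ngram_words : List String) (ngram_value : String), Dom_extract_corresponding_subsequence_py input_words ngram_words ngram_value → Spec_extract_corresponding_subsequence_py input_words ngram_words ngram_value (extract_corresponding_subsequence_py input_words ngram_words ngram_value)

-- ===== LEMMAS AND PROOFS =====

-- slicing a cons at a positive start is slicing the tail one position earlier
lemma slice_cons_shift {α : Type} (x : α) (xs : List α) (a : Int) (m : Nat) (ha : 1 ≤ a) :
    PySem.List.slice (x :: xs) (some a) (some (a + (m : Int))) =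
    PySem.List.slice xs (some (a - 1)) (some ((a - 1) + (m : Int))) := by
  rw [PySem.List.slice_toNat _ (by omega) (by omega), PySem.List.slice_toNat _ (by omega) (by omega)]
  have h1 : a.toNat = (a - 1).toNat + 1 := by omega
  rw [h1, List.drop_succ_cons]
  congr 1
  omega

lemma aLoop_map_succ (iw nw vals : List String) (x y : String) :
    ∀ r : List Int, (∀ i ∈ r, 1 ≤ i) →
      pvALoop iw (x :: nw) (y :: vals) r = pvALoop iw nw vals (r.map (· - 1)) := by
  intro r
  induction r with
  | nil => intro _; rfl
  | cons i rest ih =>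
    intro h
    have hi : 1 ≤ i := h i (by simp)
    simp only [List.map_cons, pvALoop, slice_cons_shift _ _ _ _ hi]
    exact if_congr Iff.rfl rfl (ih (fun j hj => h j (by simp [hj])))

lemma map_sub_one_pyRange (c : Int) :
    (PySem.List.pyRange 1 c 1).map (· - 1) = PySem.List.pyRange 0 (c - 1) 1 := by
  rw [PySem.List.pyRange_one, PySem.List.pyRange_one, List.map_map]
  have h : (c - 1 - 0).toNat = (c - 1).toNat := by omega
  rw [h]
  exact List.map_congr_left (fun k _ => by simp only [Function.comp_apply]; omega)

lemma loops_agree (iw : List String) :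
    ∀ (nw vals : List String), vals.length = nw.length →
      pvALoop iw nw vals (PySem.List.pyRange 0 ((nw.length : Int) - (iw.length : Int) + 1) 1) =
      pvBLoop iw (nw.zip vals) := by
  intro nw
  induction nw with
  | nil =>
    intro vals hlen
    have hv : vals = [] := List.length_eq_zero_iff.mp hlen
    subst hv
    cases iw with
    | nil => decide
    | cons w iw' =>
      rw [PySem.List.pyRange_one_eq_nil (by simp only [List.length_nil, List.length_cons]; push_cast; omega)]
      simp [pvALoop, pvBLoop]
  | cons x nw' ih =>
    intro vals hlen
    cases vals with
    | nil => simp at hlen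
    | cons y vals' =>
      have hlen' : vals'.length = nw'.length := by simpa using hlen
      simp only [List.zip_cons_cons]
      by_cases hm : iw.length ≤ nw'.length + 1
      · -- range is nonempty: first position 0, then the shifted tail range
        have hU : (0 : Int) < ((x :: nw').length : Int) - (iw.length : Int) + 1 := by
          simp only [List.length_cons]; push_cast; omega
        rw [PySem.List.pyRange_one_cons hU]
        have hzip : (x, y) :: nw'.zip vals' = (x :: nw').zip (y :: vals') := rfl
        have hslicew : PySem.List.slice (x :: nw') (some 0) (some (0 + (iw.length : Int))) =
            (((x, y) :: nw'.zip vals').take iw.length).map Prod.fst := by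
          rw [PySem.List.slice_toNat _ (by omega) (by omega), hzip, List.map_take,
            List.map_fst_zip (by simp [hlen'])]
          simp
        have hslicev : PySem.List.slice (y :: vals') (some 0) (some (0 + (iw.length : Int))) =
            (((x, y) :: nw'.zip vals').take iw.length).map Prod.snd := by
          rw [PySem.List.slice_toNat _ (by omega) (by omega), hzip, List.map_take,
            List.map_snd_zip (by simp [hlen'])]
          simp
        have hBlen : ¬ ((x, y) :: nw'.zip vals').length < iw.length := by
          simp [hlen']; omega
        rw [pvBLoop.eq_def]
        simp only [pvALoop, hslicew, hslicev, if_neg hBlen]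
        by_cases hc : ((((x, y) :: nw'.zip vals').take iw.length).map Prod.fst) = iw
        · rw [if_pos hc, if_pos hc]
        · rw [if_neg hc, if_neg hc]
          simp only [zero_add]
          rw [aLoop_map_succ iw nw' vals' x y _
              (fun i hi => ((PySem.List.mem_pyRange_one).mp hi).1),
            map_sub_one_pyRange]
          have harg : ((x :: nw').length : Int) - (iw.length : Int) + 1 - 1 =
              ((nw'.length : Int) - (iw.length : Int) + 1) := by
            simp only [List.length_cons]; push_cast; omega
          rw [harg]
          exact ih vals' hlen'
      · -- input longer than the ngram: empty range on the A side, length guard on the B side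
        rw [PySem.List.pyRange_one_eq_nil (by simp only [List.length_cons]; push_cast; omega)]
        rw [pvBLoop.eq_def]
        have hlt : ((x, y) :: nw'.zip vals').length < iw.length := by
          simp [hlen']; omega
        rw [if_pos hlt]
        rfl

-- ===== VERDICT (by name: the statement is the Claim_ definition above) =====
theorem extract_corresponding_subsequence_py_spec : Claim_equal_extract_corresponding_subsequence_py := by
  intro iw nw nv _
  unfold Spec_extract_corresponding_subsequence_py extract_corresponding_subsequence_py extract_corresponding_subsequence_py_alt
  by_cases hlen : ((PySem.Str.split₀ nv).length : Int) ≠ (nw.length : Int)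
  · simp only [if_pos hlen]
  · simp only [if_neg hlen]
    exact loops_agree iw nw (PySem.Str.split₀ nv) (by omega)
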